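-- pv_equiv track=rewrite | github.com/mimikrija/AdventOfCode2017 | 04.py | no_anagrams
-- ===== SOURCE A (Python) =====
-- def has_unique(words):
--     temp = []
--     for word in words:
--         if word not in temp:
--             temp.append(word)
--     return len(temp) == len(words)
--
-- def no_anagrams(words):
--     temp = []
--     for word in words:
--         anagram = []
--         for c in word:
--             anagram.append(c)
--         anagram.sort()
--         anagram= (''.join(anagram))
--         temp.append(anagram)
--     return has_unique(temp)
-- ===== SOURCE B (Python) =====
-- def no_anagrams(words):
--     # Histogram-based anagram signature: each word is canonicalized by its
--     # character-count table (sorted by character), and uniqueness is judged by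
--     # collecting the signatures in a hash set -- no quadratic list scans.
--     # Duplicate words are already duplicate signatures, so short-circuit first.
--     if len(set(words)) != len(words):
--         return False
--     signatures = set()
--     for word in words:
--         hist = {}
--         for c in word:
--             hist[c] = hist.get(c, 0) + 1
--         signatures.add(tuple(sorted(hist.items(), key=lambda item: item[0])))
--     return len(signatures) == len(words)
-- ===== Notes on version B (the rewrite author's own statement) =====
-- stated objective: faster
-- what changed: Replaces per-word character sorting plus a quadratic 'not in list' dedup scan with a hash-set of character-count-table signatures, with an up-front duplicate-word short-circuit.
import Mathlib
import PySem

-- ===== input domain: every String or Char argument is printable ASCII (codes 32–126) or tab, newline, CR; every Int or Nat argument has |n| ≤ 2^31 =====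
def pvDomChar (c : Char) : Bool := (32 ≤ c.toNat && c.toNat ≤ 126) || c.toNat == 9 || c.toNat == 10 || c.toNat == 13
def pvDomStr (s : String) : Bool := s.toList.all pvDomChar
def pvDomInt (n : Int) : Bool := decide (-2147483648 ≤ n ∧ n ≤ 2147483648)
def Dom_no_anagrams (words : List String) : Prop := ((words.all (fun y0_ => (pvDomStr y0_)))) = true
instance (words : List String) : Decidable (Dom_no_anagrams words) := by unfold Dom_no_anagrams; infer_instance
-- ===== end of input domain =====

-- B replaces A's per-word character sort + quadratic list-membership dedup by per-word
-- character-count-table signatures collected in a set, with a duplicate-word short-circuit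
-- (measured faster in a timing run).


-- ===== PORT A =====
def has_unique (words : List String) : Bool :=
  let temp := words.foldl (fun temp word =>
    if temp.contains word then temp else temp ++ [word]) []
  decide (temp.length = words.length)

def no_anagrams (words : List String) : Bool :=
  let temp := words.foldl (fun temp word =>
    let anagram := word.toList.foldl (fun a c => a ++ [c]) []
    let anagram := PySem.List.sorted anagram (fun x => x) false
    let anagram := String.ofList anagram     -- ''.join of a list of single-char strings
    temp ++ [anagram]) []
  has_unique temp

-- ===== PORT B =====
def no_anagrams_alt (words : List String) : Bool :=
  if PySem.Set.len (PySem.Set.ofList words) ≠ (words.length : Int) then false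
  else
    let sigs := words.foldl (fun sigs word =>
      let hist := word.toList.foldl (fun d c => d.insert c (d.getD c 0 + 1))
        (PySem.Dict.empty : PySem.Dict Char Int)
      PySem.Set.add sigs (PySem.List.sorted hist.items (fun item => item.1) false))
      PySem.Set.empty
    decide (PySem.Set.len sigs = (words.length : Int))

-- ===== PRECONDITION & SPEC =====
def Spec_no_anagrams (words : List String) (out : Bool) : Prop := out = no_anagrams_alt words
instance (words : List String) (out : Bool) : Decidable (Spec_no_anagrams words out) := by unfold Spec_no_anagrams; infer_instance

-- ===== CLAIM (what is proved, stated in full; the proofs are below) =====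
def Claim_equal_no_anagrams : Prop := ∀ (words : List String), Dom_no_anagrams words → Spec_no_anagrams words (no_anagrams words)

-- ===== LEMMAS AND PROOFS =====

-- A's canonical form of a word: its characters sorted
def sigA (w : String) : String := String.ofList (PySem.List.sorted w.toList (fun x => x) false)
-- B's canonical form of a word: its character-count table, sorted by character
def sigB (w : String) : List (Char × Int) :=
  PySem.List.sorted ((PySem.Set.ofList w.toList).map (fun k => (k, (w.toList.count k : Int))))
    (fun item => item.1) false

lemma no_anagrams_eq (words : List String) :
    no_anagrams words = decide ((PySem.Set.ofList (words.map sigA)).length = words.length) := by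
  have htemp : words.foldl (fun temp word =>
      let anagram := word.toList.foldl (fun a c => a ++ [c]) []
      let anagram := PySem.List.sorted anagram (fun x => x) false
      let anagram := String.ofList anagram
      temp ++ [anagram]) [] = words.map sigA := by
    have hin : ∀ cs : List Char, cs.foldl (fun a c => a ++ [c]) [] = cs := fun cs => by
      simpa using PySem.List.foldl_append_singleton_eq_map id cs []
    simp only [hin]
    simpa using PySem.List.foldl_append_singleton_eq_map sigA words []
  have hadd : (fun (temp : List String) word =>
      if temp.contains word then temp else temp ++ [word]) = PySem.Set.add := rfl
  simp only [no_anagrams, htemp, has_unique, hadd, ← PySem.Set.ofList_eq_foldl,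
    List.length_map]

lemma no_anagrams_alt_eq (words : List String) :
    no_anagrams_alt words =
      if (PySem.Set.ofList words).length ≠ words.length then false
      else decide ((PySem.Set.ofList (words.map sigB)).length = words.length) := by
  have hsig : ∀ w : String,
      PySem.List.sorted (PySem.Dict.items (w.toList.foldl
          (fun d c => d.insert c (d.getD c 0 + 1)) (PySem.Dict.empty : PySem.Dict Char Int)))
        (fun item => item.1) false = sigB w := by
    intro w
    rw [PySem.Dict.foldl_insert_getD_add_one_eq_counter, PySem.Dict.items_counter, sigB]
  have hfold : words.foldl (fun sigs word =>
      PySem.Set.add sigs (PySem.List.sorted (PySem.Dict.items (word.toList.foldl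
          (fun d c => d.insert c (d.getD c 0 + 1)) (PySem.Dict.empty : PySem.Dict Char Int)))
        (fun item => item.1) false)) PySem.Set.empty
      = PySem.Set.ofList (words.map sigB) := by
    simp only [hsig]
    rw [PySem.Set.ofList_eq_foldl, List.foldl_map]; rfl
  simp only [no_anagrams_alt, hfold, PySem.Set.len, ne_eq, Nat.cast_injective.eq_iff]

lemma len_ofList_eq_card {β : Type} [BEq β] [LawfulBEq β] [DecidableEq β] (xs : List β) :
    (PySem.Set.ofList xs).length = xs.toFinset.card := by
  have h1 : (PySem.Set.ofList xs).toFinset.card = (PySem.Set.ofList xs).length :=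
    List.toFinset_card_of_nodup (PySem.Set.nodup_ofList xs)
  have h2 : (PySem.Set.ofList xs).toFinset = xs.toFinset := by
    ext y; simp [List.mem_toFinset, PySem.Set.mem_ofList]
  rw [← h1, h2]

-- B's canonical form in explicit shape: counts listed along the sorted distinct characters
lemma sigB_rep (w : String) :
    sigB w = (PySem.List.sorted (PySem.Set.ofList w.toList) (fun x => x) false).map
      (fun c => (c, (w.toList.count c : Int))) := by
  apply PySem.List.sorted_eq_of_perm_of_pairwise_lt
  · exact (PySem.List.sorted_perm _ _ _).map _
  · exact List.Pairwise.map _ (fun a b h => h) (PySem.List.sorted_ofList_pairwise_lt w.toList)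

lemma sig_iff (a b : String) : sigA a = sigA b ↔ sigB a = sigB b := by
  rw [sigA, sigA, String.ofList_inj, PySem.List.sorted_id_eq_sorted_id_iff_perm,
    sigB_rep, sigB_rep]
  constructor
  · intro hperm
    have hset : (PySem.Set.ofList a.toList).Perm (PySem.Set.ofList b.toList) := by
      apply List.perm_of_nodup_nodup_toFinset_eq (PySem.Set.nodup_ofList _)
        (PySem.Set.nodup_ofList _)
      ext c; simp [List.mem_toFinset, PySem.Set.mem_ofList, hperm.mem_iff]
    rw [(PySem.List.sorted_id_eq_sorted_id_iff_perm _ _).2 hset]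
    apply List.map_inj_left.2
    intro c _
    rw [hperm.count_eq]
  · intro h
    have hS : PySem.List.sorted (PySem.Set.ofList a.toList) (fun x => x) false
        = PySem.List.sorted (PySem.Set.ofList b.toList) (fun x => x) false := by
      have := congrArg (List.map Prod.fst) h
      simpa [Function.comp_def] using this
    rw [hS] at h
    have hcount : ∀ c ∈ PySem.List.sorted (PySem.Set.ofList b.toList) (fun x => x) false,
        a.toList.count c = b.toList.count c := by
      intro c hc
      have := List.map_inj_left.1 h c hc
      have h2 := congrArg Prod.snd this
      simp only [] at h2
      exact_mod_cast h2
    rw [List.perm_iff_count]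
    intro c
    by_cases hmem : c ∈ a.toList ∨ c ∈ b.toList
    · apply hcount
      rw [PySem.List.mem_sorted, PySem.Set.mem_ofList]
      rcases hmem with hma | hmb
      · have : c ∈ PySem.Set.ofList a.toList := (PySem.Set.mem_ofList _ _).2 hma
        have : c ∈ PySem.List.sorted (PySem.Set.ofList a.toList) (fun x => x) false := by
          rw [PySem.List.mem_sorted]; exact this
        rw [hS, PySem.List.mem_sorted, PySem.Set.mem_ofList] at this
        exact this
      · exact hmb
    · push Not at hmem
      rw [List.count_eq_zero.2 hmem.1, List.count_eq_zero.2 hmem.2]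

lemma toFinset_map' {α β : Type} [DecidableEq α] [DecidableEq β] (f : α → β) (l : List α) :
    (l.map f).toFinset = l.toFinset.image f := by
  ext b; simp

lemma len_ofList_map {β γ : Type} [BEq β] [LawfulBEq β] [BEq γ] [LawfulBEq γ]
    (f : String → β) (g : String → γ) (l : List String)
    (h : ∀ a ∈ l, ∀ b ∈ l, (f a = f b ↔ g a = g b)) :
    (PySem.Set.ofList (l.map f)).length = (PySem.Set.ofList (l.map g)).length := by
  induction l using List.reverseRecOn with
  | nil => rfl
  | append_singleton l y ih =>
    have hsub : ∀ a ∈ l, ∀ b ∈ l, (f a = f b ↔ g a = g b) := fun a hal b hbl =>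
      h a (List.mem_append_left _ hal) b (List.mem_append_left _ hbl)
    have hstepf : PySem.Set.ofList ((l ++ [y]).map f)
        = PySem.Set.add (PySem.Set.ofList (l.map f)) (f y) := by
      rw [List.map_append, PySem.Set.ofList_eq_foldl, List.foldl_append,
        ← PySem.Set.ofList_eq_foldl]; rfl
    have hstepg : PySem.Set.ofList ((l ++ [y]).map g)
        = PySem.Set.add (PySem.Set.ofList (l.map g)) (g y) := by
      rw [List.map_append, PySem.Set.ofList_eq_foldl, List.foldl_append,
        ← PySem.Set.ofList_eq_foldl]; rfl
    have hy : y ∈ l ++ [y] := List.mem_append_right _ (List.mem_singleton.2 rfl)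
    have hmemiff : f y ∈ PySem.Set.ofList (l.map f) ↔ g y ∈ PySem.Set.ofList (l.map g) := by
      rw [PySem.Set.mem_ofList, PySem.Set.mem_ofList, List.mem_map, List.mem_map]
      constructor
      · rintro ⟨a, hal, hfa⟩
        exact ⟨a, hal, (h a (List.mem_append_left _ hal) y hy).1 hfa⟩
      · rintro ⟨a, hal, hga⟩
        exact ⟨a, hal, (h a (List.mem_append_left _ hal) y hy).2 hga⟩
    rw [hstepf, hstepg]
    by_cases hin : f y ∈ PySem.Set.ofList (l.map f)
    · have hing : g y ∈ PySem.Set.ofList (l.map g) := hmemiff.1 hin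
      simp only [PySem.Set.add, PySem.Set.contains]
      rw [if_pos (by simpa using hin), if_pos (by simpa using hing)]
      exact ih hsub
    · have hing : g y ∉ PySem.Set.ofList (l.map g) := fun hg => hin (hmemiff.2 hg)
      simp only [PySem.Set.add, PySem.Set.contains]
      rw [if_neg (by simpa using hin), if_neg (by simpa using hing)]
      simp [ih hsub]

-- ===== VERDICT (by name: the statement is the Claim_ definition above) =====
theorem no_anagrams_spec : Claim_equal_no_anagrams := by
  intro words _
  unfold Spec_no_anagrams
  rw [no_anagrams_eq, no_anagrams_alt_eq]
  by_cases hdup : (PySem.Set.ofList words).length ≠ words.length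
  · rw [if_pos hdup]
    have hle : (PySem.Set.ofList (words.map sigA)).length ≤ (PySem.Set.ofList words).length := by
      rw [len_ofList_eq_card, len_ofList_eq_card, toFinset_map']
      exact Finset.card_image_le
    have hlt : (PySem.Set.ofList words).length < words.length :=
      lt_of_le_of_ne (by rw [len_ofList_eq_card]; exact List.toFinset_card_le words) hdup
    simp only [decide_eq_false_iff_not]
    omega
  · rw [if_neg hdup,
      len_ofList_map sigA sigB words (fun a _ b _ => sig_iff a b)]
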